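-- pv_equiv track=rewrite | github.com/raresGabriel01/Algorithms | Codeforces/1B.py | conv12
-- ===== SOURCE A (Python) =====
-- def poz(ch):
--     return ord(ch)-64
--
-- def conv12(coord):
--     aux = ""
--     index = 0
--     for i in range(len(coord)):
--         if coord[i].isalpha() == True:
--             aux += coord[i]
--         else:
--             index = i
--             break
--
--
--     conv = "R" + coord[index:] + "C"
--
--     nr = 0
--
--
--
--     #########################
--     #l1 l2 l3 ... ln
--     #val  = 26^(n-1) * poz (l1) + 26^(n-2) * poz(l2) + ... + 26^0 * poz(ln)
--     #########################
--
--     for i in range (index):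
--         nr += 26**(index-i-1) * poz(coord[i])
--
--     conv += str(nr)
--     return conv
-- ===== SOURCE B (Python) =====
-- def conv12(coord):
--     split = None
--     run = []
--     for i, ch in reversed(list(enumerate(coord))):
--         if ch.isalpha():
--             run.append(ord(ch) - 64)
--         else:
--             split, run = i, []
--     if split is None:
--         return "R" + coord + "C0"
--     nr, p = 0, 1
--     for d in run:
--         nr += d * p
--         p *= 26
--     return "R" + coord[split:] + "C" + str(nr)
-- ===== Notes on version B (the rewrite author's own statement) =====
-- stated objective: alternative
-- what changed: A makes two staged forward passes (a scan building an unused aux to find the first non-alpha index, then a loop summing 26^(index-i-1)*poz(coord[i])); B scans once right-to-left over reversed(enumerate(coord)), collecting the digits of the current trailing alpha run and resetting it at every non-letter so the leftmost non-letter's state survives, then decodes only the surviving prefix run with a running place multiplier (no exponentiation, no forward split search).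
import Mathlib
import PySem

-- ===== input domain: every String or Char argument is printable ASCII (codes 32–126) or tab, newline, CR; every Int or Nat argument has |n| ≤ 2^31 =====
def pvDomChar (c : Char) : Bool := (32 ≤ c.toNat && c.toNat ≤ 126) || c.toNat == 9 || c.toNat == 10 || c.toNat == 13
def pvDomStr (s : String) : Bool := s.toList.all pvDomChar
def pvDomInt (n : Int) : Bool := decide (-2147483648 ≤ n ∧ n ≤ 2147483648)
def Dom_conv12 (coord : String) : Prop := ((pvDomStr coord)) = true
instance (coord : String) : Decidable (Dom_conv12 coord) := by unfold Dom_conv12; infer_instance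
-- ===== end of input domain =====

-- B replaces A's two staged forward passes (find the first non-alpha index, then a
-- power-sum loop over the prefix) by ONE right-to-left pass over reversed(enumerate)
-- that carries (split, value, place) and resets on each non-letter; objective: alternative.

-- ===== PORT A =====
-- poz(ch) = ord(ch) - 64
def pozA (c : Char) : Int := (c.toNat : Int) - 64

-- A's first loop: append alpha chars to aux; on the first non-alpha char record its
-- index and break (index stays 0 when the loop runs to completion, as in A).
def conv12Loop : List Char → Nat → List Char → List Char × Nat
  | [], _, aux => (aux, 0)
  | c :: rest, i, aux =>
      if PySem.Chars.isalpha c then conv12Loop rest (i + 1) (aux ++ [c])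
      else (aux, i)

def conv12 (coord : String) : String :=
  let cs := coord.toList
  let index := (conv12Loop cs 0 []).2
  let conv := ['R'] ++ PySem.List.slice cs (some (index : Int)) none ++ ['C']
  let nr := (PySem.List.pyRange 0 (index : Int)).foldl
      (fun nr i =>
        nr + (26 : Int) ^ (index - i.toNat - 1) * pozA (PySem.List.pyGetD cs i ' ')) 0
  String.ofList (conv ++ PySem.Int.toChars nr)

-- ===== PORT B =====
-- state = (split, run); one fold over reversed(list(enumerate(coord))) collecting the
-- digits of the current trailing alpha run, reset at every non-letter
def conv12AltStep (s : Option Int × List Int) (ic : Int × Char) : Option Int × List Int :=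
  if PySem.Chars.isalpha ic.2 then (s.1, s.2 ++ [((ic.2.toNat : Int) - 64)])
  else (some ic.1, [])

-- the final decode loop: nr += d * p; p *= 26
def conv12AltDecode (st : Int × Int) (d : Int) : Int × Int := (st.1 + d * st.2, st.2 * 26)

def conv12_alt (coord : String) : String :=
  let cs := coord.toList
  let st := ((PySem.List.enumerate cs 0).reverse).foldl conv12AltStep (none, [])
  match st.1 with
  | none => String.ofList (['R'] ++ cs ++ ['C', '0'])
  | some i =>
      let nr := (st.2.foldl conv12AltDecode (0, 1)).1
      String.ofList (['R'] ++ PySem.List.slice cs (some i) none ++ ['C'] ++ PySem.Int.toChars nr)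

-- ===== PRECONDITION & SPEC =====
def Spec_conv12 (coord : String) (out : String) : Prop := out = conv12_alt coord
instance (coord : String) (out : String) : Decidable (Spec_conv12 coord out) := by unfold Spec_conv12; infer_instance

-- ===== CLAIM (what is proved, stated in full; the proofs are below) =====
def Claim_equal_conv12 : Prop := ∀ (coord : String), Dom_conv12 coord → Spec_conv12 coord (conv12 coord)

-- ===== LEMMAS AND PROOFS =====

-- value of A's split index
theorem loopA_idx (cs : List Char) : ∀ (i : Nat) (aux : List Char),
    (conv12Loop cs i aux).2 =
      if cs.all PySem.Chars.isalpha then 0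
      else i + (cs.takeWhile PySem.Chars.isalpha).length := by
  induction cs with
  | nil => intro i aux; simp [conv12Loop]
  | cons c rest ih =>
    intro i aux
    by_cases h : PySem.Chars.isalpha c = true
    · simp only [conv12Loop, if_pos, List.all_cons, h, Bool.true_and,
        List.takeWhile_cons_of_pos h, ih]
      by_cases hr : rest.all PySem.Chars.isalpha <;> simp [hr] <;> omega
    · simp [conv12Loop, h, List.all_cons, List.takeWhile_cons_of_neg]

-- A's power sum over a list
def asum (P : List Char) : Int :=
  ((List.range P.length).map
      (fun j => (26 : Int) ^ (P.length - j - 1) * pozA (P.getD j ' '))).sum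

theorem asum_cons (c : Char) (Q : List Char) :
    asum (c :: Q) = (26 : Int) ^ Q.length * pozA c + asum Q := by
  simp only [asum, List.length_cons, List.range_succ_eq_map, List.map_cons,
    List.map_map, List.sum_cons]
  congr 1
  apply congrArg List.sum
  apply List.map_congr_left
  intro j hj
  simp only [Function.comp_apply, Nat.succ_eq_add_one, List.getD_cons_succ]
  have he : Q.length + 1 - (j + 1) - 1 = Q.length - j - 1 := by omega
  rw [he]

-- A's nr-loop computes asum of the alpha prefix
theorem loopA_nr (cs : List Char) :
    (PySem.List.pyRange 0 ((cs.takeWhile PySem.Chars.isalpha).length : Int)).foldl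
        (fun nr i =>
          nr + (26 : Int) ^ ((cs.takeWhile PySem.Chars.isalpha).length - i.toNat - 1) *
            pozA (PySem.List.pyGetD cs i ' ')) 0
      = asum (cs.takeWhile PySem.Chars.isalpha) := by
  set P := cs.takeWhile PySem.Chars.isalpha with hP
  set k := P.length with hk
  rw [PySem.List.foldl_add]
  rw [PySem.List.pyRange_zero_natCast k, List.map_map]
  simp only [asum, zero_add, ← hk]
  congr 1
  apply List.map_congr_left
  intro j hj
  rw [List.mem_range] at hj
  have hpre : P <+: cs := hP ▸ List.takeWhile_prefix _
  obtain ⟨t, ht⟩ := hpre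
  simp only [Function.comp, Int.toNat_natCast, PySem.List.pyGetD_natCast]
  rw [← ht, List.getD_append _ _ _ _ (by omega)]

-- B's reversed fold, fully characterized (with arbitrary enumerate start s)
theorem loopB_state (cs : List Char) : ∀ (s : Int),
    ((PySem.List.enumerate cs s).reverse).foldl conv12AltStep (none, []) =
      if cs.all PySem.Chars.isalpha then
        (none, (cs.map pozA).reverse)
      else
        (some (s + ((cs.takeWhile PySem.Chars.isalpha).length : Int)),
         ((cs.takeWhile PySem.Chars.isalpha).map pozA).reverse) := by
  induction cs with
  | nil => intro s; simp [PySem.List.enumerate_nil]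
  | cons c rest ih =>
    intro s
    rw [PySem.List.enumerate_cons, List.reverse_cons, List.foldl_append, ih (s + 1)]
    by_cases h : PySem.Chars.isalpha c = true
    · by_cases hr : rest.all PySem.Chars.isalpha = true
      · simp [hr, conv12AltStep, h, List.all_cons, pozA]
      · have hrf : rest.all PySem.Chars.isalpha = false := eq_false_of_ne_true hr
        simp only [List.foldl_cons, List.foldl_nil, conv12AltStep, h, hrf,
          Bool.false_eq_true, if_false, List.all_cons, Bool.true_and, if_true,
          List.takeWhile_cons_of_pos h, List.length_cons, List.map_cons, List.reverse_cons]
        refine Prod.ext ?_ rfl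
        simp; ring
    · have hall : ¬ ((c :: rest).all PySem.Chars.isalpha = true) := by simp [List.all_cons, h]
      rw [if_neg hall]
      rw [List.takeWhile_cons_of_neg (by simp [h])]
      by_cases hr : rest.all PySem.Chars.isalpha = true <;>
        simp [hr, conv12AltStep, h]

-- decoding the reversed digit list of a prefix yields A's power sum
theorem decode_rev (P : List Char) :
    ((P.map pozA).reverse).foldl conv12AltDecode (0, 1) = (asum P, (26 : Int) ^ P.length) := by
  induction P with
  | nil => simp [asum]
  | cons c Q ih =>
    rw [List.map_cons, List.reverse_cons, List.foldl_append, ih, asum_cons]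
    simp [conv12AltDecode, pow_succ]
    ring

-- ===== VERDICT (by name: the statement is the Claim_ definition above) =====
theorem conv12_spec : Claim_equal_conv12 := by
  intro coord _
  unfold Spec_conv12
  simp only [conv12, conv12_alt]
  rw [loopB_state coord.toList 0]
  by_cases hall : (coord.toList).all PySem.Chars.isalpha = true
  · have hA : (conv12Loop coord.toList 0 []).2 = 0 := by rw [loopA_idx]; simp [hall]
    rw [hA, if_pos hall]
    simp [PySem.List.slice_from coord.toList (le_refl (0 : Int)), PySem.List.pyRange,
      PySem.Int.toChars]
  · have hall' : (coord.toList).all PySem.Chars.isalpha = false := eq_false_of_ne_true hall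
    have hA : (conv12Loop coord.toList 0 []).2
        = (coord.toList.takeWhile PySem.Chars.isalpha).length := by
      rw [loopA_idx]; simp [hall']
    rw [hA, if_neg hall, loopA_nr]
    have hk : (0:Int) ≤ ((coord.toList.takeWhile PySem.Chars.isalpha).length : Int) := by
      positivity
    simp only [zero_add, PySem.List.slice_from _ hk, Int.toNat_natCast, decode_rev]
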